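-- pv_equiv track=rewrite | github.com/FlyingWorkshop/PokeBot | alphagogoat/utils.py | _get_turns
-- ===== SOURCE A (Python) =====
-- def _get_turns(log) -> list:
--     turns = []
--     turn = []
--     for line in log.split('\n'):
--         if line.startswith("|turn|") and turn:
--             turns.append(turn)
--             turn = []
--         turn.append(line)
--     return turns
-- ===== SOURCE B (Python) =====
-- def _get_turns(log) -> list:
--     lines = log.split('\n')
--     groups = []
--     i = 0
--     n = len(lines)
--     while i < n:
--         j = i + 1
--         while j < n and not lines[j].startswith('|turn|'):
--             j += 1
--         groups.append(lines[i:j])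
--         i = j
--     return groups[:-1]
-- ===== Notes on version B (the rewrite author's own statement) =====
-- stated objective: alternative
-- what changed: B finds each next '|turn|' boundary by an index scan and slices whole turns out of the line list, then drops the last group, instead of A's single fold threading a (turns, current-turn) accumulator pair.
import Mathlib
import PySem

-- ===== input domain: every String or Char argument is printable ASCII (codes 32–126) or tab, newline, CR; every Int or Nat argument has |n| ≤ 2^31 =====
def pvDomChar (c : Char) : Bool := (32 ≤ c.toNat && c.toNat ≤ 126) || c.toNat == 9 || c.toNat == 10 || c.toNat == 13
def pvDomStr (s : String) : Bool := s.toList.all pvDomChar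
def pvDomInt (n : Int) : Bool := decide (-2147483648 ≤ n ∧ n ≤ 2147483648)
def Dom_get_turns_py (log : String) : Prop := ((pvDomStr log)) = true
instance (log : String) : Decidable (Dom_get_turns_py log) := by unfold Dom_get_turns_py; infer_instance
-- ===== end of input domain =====

-- B: boundary-scan + slicing decomposition instead of A's accumulator fold; same result, same cost (objective: alternative).

-- ===== PORT A =====
def get_turns_py (log : String) : List (List String) :=
  let lines := (PySem.Str.split? log "\n").getD []
  (lines.foldl (fun st line =>
      if PySem.Str.startswith line "|turn|" && !st.2.isEmpty then
        (st.1 ++ [st.2], [line])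
      else
        (st.1, st.2 ++ [line])) (([], []) : List (List String) × List String)).1

-- ===== PORT B =====
-- the inner while-loop of Source B scans to the next '|turn|' boundary and lines[i:j] is the slice:
-- head line plus the following non-boundary lines (takeWhile); the outer loop resumes at j (dropWhile).
def pvGroups (lines : List String) : List (List String) :=
  match lines with
  | [] => []
  | l :: rest =>
    (l :: rest.takeWhile (fun s => !PySem.Str.startswith s "|turn|")) ::
      pvGroups (rest.dropWhile (fun s => !PySem.Str.startswith s "|turn|"))
termination_by lines.length
decreasing_by
  simp only [List.length_cons]
  exact Nat.lt_succ_of_le (List.length_dropWhile_le _ _)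

def get_turns_py_alt (log : String) : List (List String) :=
  (pvGroups ((PySem.Str.split? log "\n").getD [])).dropLast

-- ===== PRECONDITION & SPEC =====
def Spec_get_turns_py (log : String) (out : List (List String)) : Prop := out = get_turns_py_alt log
instance (log : String) (out : List (List String)) : Decidable (Spec_get_turns_py log out) := by unfold Spec_get_turns_py; infer_instance

-- ===== CLAIM (what is proved, stated in full; the proofs are below) =====
def Claim_equal_get_turns_py : Prop := ∀ (log : String), Dom_get_turns_py log → Spec_get_turns_py log (get_turns_py log)

-- ===== LEMMAS AND PROOFS =====

theorem pvGo_ne_nil (sep : List Char) (fuel : Nat) (l cur : List Char) (acc : List (List Char)) :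
    PySem.Chars.splitOn.go sep fuel l cur acc ≠ [] := by
  induction fuel generalizing l cur acc with
  | zero => simp [PySem.Chars.splitOn.go]
  | succ n ih =>
    cases l with
    | nil => simp [PySem.Chars.splitOn.go]
    | cons c rest =>
      rw [PySem.Chars.splitOn.go]
      split
      · exact ih _ _ _
      · exact ih _ _ _

theorem pvSplit_ne_nil (log : String) : (PySem.Str.split? log "\n").getD [] ≠ [] := by
  simp [PySem.Str.split?, PySem.Chars.split?, PySem.Chars.splitOn, List.isEmpty]
  intro h
  exact pvGo_ne_nil _ _ _ _ _ h

-- key invariant: with a nonempty current turn t, A's fold emits ts followed by the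
-- boundary-sliced groups of (t seeded with the coming non-boundary lines), minus the last group
theorem pvInv (ls : List String) (t : List String) (ts : List (List String)) (ht : t ≠ []) :
    (ls.foldl (fun st line =>
      if PySem.Str.startswith line "|turn|" && !st.2.isEmpty then
        (st.1 ++ [st.2], [line])
      else
        (st.1, st.2 ++ [line])) (ts, t)).1 =
    ts ++ (((t ++ ls.takeWhile (fun s => !PySem.Str.startswith s "|turn|")) ::
      pvGroups (ls.dropWhile (fun s => !PySem.Str.startswith s "|turn|"))).dropLast) := by
  induction ls generalizing t ts with
  | nil => simp [pvGroups]
  | cons l rest ih =>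
    rw [List.foldl_cons, List.takeWhile_cons, List.dropWhile_cons]
    by_cases hb : PySem.Str.startswith l "|turn|" = true
    · have hb' : PySem.Chars.startswith l.toList ['|','t','u','r','n','|'] = true := by
        simpa using hb
      have hne : (!t.isEmpty) = true := by simp [ht]
      rw [if_pos (by simp [hb', hne])]
      rw [ih [l] (ts ++ [t]) (by simp)]
      simp [hb', pvGroups, List.append_assoc]
    · have hb' : PySem.Chars.startswith l.toList ['|','t','u','r','n','|'] = false := by
        simpa using hb
      rw [if_neg (by simp [hb'])]
      rw [ih (t ++ [l]) ts (by simp)]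
      simp [hb', List.append_assoc]

-- ===== VERDICT (by name: the statement is the Claim_ definition above) =====
theorem get_turns_py_spec : Claim_equal_get_turns_py := by
  intro log _
  unfold Spec_get_turns_py get_turns_py get_turns_py_alt
  obtain ⟨l, rest, hl⟩ : ∃ l rest, (PySem.Str.split? log "\n").getD [] = l :: rest := by
    cases h : (PySem.Str.split? log "\n").getD [] with
    | nil => exact absurd h (pvSplit_ne_nil log)
    | cons a b => exact ⟨a, b, rfl⟩
  simp only [hl]
  rw [List.foldl_cons]
  rw [if_neg (by simp)]
  exact (pvInv rest [l] [] (by simp)).trans (by simp [pvGroups])
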